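-- pv_equiv track=rewrite | github.com/QuitoTactico/PYTHON | Datos y Algoritmos 1/Deque/hash_arregloXOR_PRO.py | arreglo
-- ===== SOURCE A (Python) =====
-- from collections import deque
--
-- def arreglo(arr1: list, arr2: list):
--     commh = {}
--     commd = deque()
--     for i in arr1 + arr2:
--         commh[i] = 0
--     for i in arr1 + arr2:
--         commh[i] = commh[i] + 1
--     for i in commh:
--         if commh[i] == 1:
--             commd.append(i)
--     res = list(commd)
--     res.sort()
--     return res
-- ===== SOURCE B (Python) =====
-- def arreglo(arr1: list, arr2: list):
--     # Sort the merged list once, then one pass over the sorted data: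
--     # keep exactly the values whose consecutive run has length 1.
--     s = sorted(arr1 + arr2)
--     res = []
--     i = 0
--     n = len(s)
--     while i < n:
--         j = i + 1
--         while j < n and s[j] == s[i]:
--             j += 1
--         if j == i + 1:
--             res.append(s[i])
--         i = j
--     return res
-- ===== Notes on version B (the rewrite author's own statement) =====
-- stated objective: idiomatic
-- what changed: Replaces the dict-counting passes (build keys, count, filter, then sort) with one sort of the merged list followed by a single run-length scan that emits values whose run has length 1, already in order.
import Mathlib
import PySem

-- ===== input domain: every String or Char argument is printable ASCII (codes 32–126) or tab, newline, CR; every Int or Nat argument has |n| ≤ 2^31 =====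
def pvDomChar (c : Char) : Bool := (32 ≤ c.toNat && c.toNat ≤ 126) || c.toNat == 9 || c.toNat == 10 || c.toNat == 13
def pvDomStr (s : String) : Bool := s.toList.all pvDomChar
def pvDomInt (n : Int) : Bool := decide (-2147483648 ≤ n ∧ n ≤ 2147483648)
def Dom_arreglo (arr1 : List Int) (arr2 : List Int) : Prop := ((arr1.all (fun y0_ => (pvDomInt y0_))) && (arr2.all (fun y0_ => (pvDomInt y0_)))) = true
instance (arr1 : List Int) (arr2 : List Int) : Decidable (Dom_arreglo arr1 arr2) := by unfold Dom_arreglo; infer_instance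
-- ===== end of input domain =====

-- B replaces A's dict-counting passes (keys, counts, filter, sort) by sorting the merged
-- list once and scanning runs, emitting values whose run length is exactly 1 (idiomatic).


-- ===== PORT A =====
def arreglo (arr1 : List Int) (arr2 : List Int) : List Int :=
  -- commh = {}; for i in arr1+arr2: commh[i] = 0
  let commh0 : PySem.Dict Int Int :=
    (arr1 ++ arr2).foldl (fun d i => d.insert i 0) PySem.Dict.empty
  -- for i in arr1+arr2: commh[i] = commh[i] + 1   (every key is present after the first loop)
  let commh : PySem.Dict Int Int :=
    (arr1 ++ arr2).foldl (fun d i => d.insert i (d.getD i 0 + 1)) commh0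
  -- commd = deque(); for i in commh: if commh[i] == 1: commd.append(i)
  let commd : List Int :=
    commh.keys.foldl (fun acc i => if commh.getD i 0 == 1 then acc ++ [i] else acc) []
  -- res = list(commd); res.sort(); return res
  PySem.List.sorted commd (fun x => x) false

-- ===== PORT B =====
-- the outer while loop over the sorted list: skip the run of elements equal to the head,
-- emit the head iff the run (beyond the head itself) is empty
def uniqRuns : List Int → List Int
  | [] => []
  | x :: rest =>
    let run := rest.takeWhile (fun y => y == x)
    let rest' := rest.dropWhile (fun y => y == x)
    if run.isEmpty then x :: uniqRuns rest' else uniqRuns rest'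
termination_by l => l.length
decreasing_by
  all_goals
    have := List.length_dropWhile_le (fun y => y == x) rest
    simp only [List.length_cons]
    omega

def arreglo_alt (arr1 : List Int) (arr2 : List Int) : List Int :=
  uniqRuns (PySem.List.sorted (arr1 ++ arr2) (fun x => x) false)

-- ===== PRECONDITION & SPEC =====
def Spec_arreglo (arr1 : List Int) (arr2 : List Int) (out : List Int) : Prop := out = arreglo_alt arr1 arr2
instance (arr1 : List Int) (arr2 : List Int) (out : List Int) : Decidable (Spec_arreglo arr1 arr2 out) := by unfold Spec_arreglo; infer_instance

-- ===== CLAIM (what is proved, stated in full; the proofs are below) =====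
def Claim_equal_arreglo : Prop := ∀ (arr1 : List Int) (arr2 : List Int), Dom_arreglo arr1 arr2 → Spec_arreglo arr1 arr2 (arreglo arr1 arr2)

-- ===== LEMMAS AND PROOFS =====

-- first loop of A: every value stored is 0, so every lookup with default 0 is 0
lemma getD_foldl_insert_zero (l : List Int) (d : PySem.Dict Int Int)
    (h : ∀ v, d.getD v 0 = 0) (v : Int) :
    (l.foldl (fun d i => d.insert i (0:Int)) d).getD v 0 = 0 := by
  induction l generalizing d with
  | nil => exact h v
  | cons x xs ih =>
    simp only [List.foldl_cons]
    refine ih _ (fun w => ?_)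
    by_cases hw : w = x
    · subst hw; rw [PySem.Dict.getD_insert_self]
    · rw [PySem.Dict.getD_insert_of_ne _ _ _ hw]; exact h w

-- inserting along a list only adds the list's elements to the key set
lemma mem_keys_foldl_insert (l : List Int) (f : PySem.Dict Int Int → Int → Int)
    (d : PySem.Dict Int Int) (x : Int) :
    x ∈ (l.foldl (fun d i => d.insert i (f d i)) d).keys ↔ x ∈ d.keys ∨ x ∈ l := by
  induction l generalizing d with
  | nil => simp
  | cons y ys ih =>
    simp only [List.foldl_cons, ih, PySem.Dict.mem_keys_insert, List.mem_cons]
    tauto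

-- run-length scan on a sorted list: membership is "count = 1" and the output is strictly increasing
lemma uniqRuns_spec (l : List Int) (hs : l.Pairwise (· ≤ ·)) :
    (∀ x, x ∈ uniqRuns l ↔ l.count x = 1) ∧ (uniqRuns l).Pairwise (· < ·) := by
  induction hn : l.length using Nat.strong_induction_on generalizing l with
  | _ n ih =>
  match l, hs with
  | [], _ => simp [uniqRuns]
  | x :: rest, hs =>
    have hle : ∀ y ∈ rest, x ≤ y := (List.pairwise_cons.mp hs).1
    have hsr : rest.Pairwise (· ≤ ·) := (List.pairwise_cons.mp hs).2
    set run := rest.takeWhile (fun y => y == x) with hrun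
    set rest' := rest.dropWhile (fun y => y == x) with hrest'
    have hsplit : rest = run ++ rest' := (List.takeWhile_append_dropWhile).symm
    have hlen' : rest'.length ≤ rest.length := List.length_dropWhile_le _ _
    have hsr' : rest'.Pairwise (· ≤ ·) := by
      rw [hsplit] at hsr; exact (List.pairwise_append.mp hsr).2.1
    have hih := ih rest'.length
      (by simp only [List.length_cons] at hn; omega) rest' hsr' rfl
    -- every element of run equals x
    have hrunx : ∀ y ∈ run, y = x := by
      intro y hy
      have := List.mem_takeWhile_imp (l := rest) (p := fun y => y == x) hy
      simpa using this
    -- every element of rest' is strictly greater than x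
    have hgt : ∀ y ∈ rest', x < y := by
      intro y hy
      match h : rest', hy with
      | z :: zs, hy =>
        have hzne : ¬ (z == x) = true := by
          have h1 := List.head?_dropWhile_not (p := fun y => y == x) (l := rest)
          rw [← hrest'] at h1; simpa using h1
        have hzx : x < z :=
          lt_of_le_of_ne (hle z (by rw [hsplit]; simp))
            (by simpa using fun e => hzne (by simp [e]))
        rcases List.mem_cons.mp hy with rfl | hmem
        · exact hzx
        · have hzy : z ≤ y := (List.pairwise_cons.mp hsr').1 y hmem
          exact lt_of_lt_of_le hzx hzy
    -- counts: x appears 1 + run.length times; other values only in rest'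
    have hcx : rest'.count x = 0 := by
      rw [List.count_eq_zero]; intro hmem; exact absurd rfl (ne_of_gt (hgt x hmem))
    have hcount : ∀ z, (x :: rest).count z = if z = x then 1 + run.length else rest'.count z := by
      intro z
      rw [hsplit]
      by_cases hz : z = x
      · subst hz
        simp [List.count_append, hcx]
        rw [List.count_eq_length.mpr (fun y hy => by simp [hrunx y hy])]
        omega
      · have hrz : run.count z = 0 := by
          rw [List.count_eq_zero]; intro hmem; exact hz (hrunx z hmem)
        simp [List.count_append, hrz, hz, Ne.symm hz]
    by_cases hre : run.isEmpty
    · -- run empty: emit x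
      have hrune : run.length = 0 := by simpa [List.isEmpty_iff_length_eq_zero] using hre
      have hur : uniqRuns (x :: rest) = x :: uniqRuns rest' := by
        rw [uniqRuns]; simp only [← hrun, ← hrest', if_pos hre]
      constructor
      · intro z
        rw [hur, hcount z]
        by_cases hz : z = x
        · subst hz; simp [hrune]
        · simp only [List.mem_cons, hz, false_or]
          exact hih.1 z
      · rw [hur]
        refine List.pairwise_cons.mpr ⟨fun y hy => ?_, hih.2⟩
        have hy' : y ∈ rest' := by
          have := (hih.1 y).mp hy
          exact List.count_pos_iff.mp (by omega)
        exact hgt y hy'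
    · -- run nonempty: x is a duplicate, drop it entirely
      have hrune : 0 < run.length := by
        rcases Nat.eq_zero_or_pos run.length with h0 | h
        · exact absurd (by simpa [List.isEmpty_iff_length_eq_zero] using h0) hre
        · exact h
      have hur : uniqRuns (x :: rest) = uniqRuns rest' := by
        rw [uniqRuns]; simp only [← hrun, ← hrest', if_neg hre]
      refine ⟨fun z => ?_, by rw [hur]; exact hih.2⟩
      rw [hur, hcount z]
      by_cases hz : z = x
      · rw [if_pos hz]
        constructor
        · intro hmem
          have h2 := (hih.1 z).mp hmem
          rw [hz, hcx] at h2
          exact absurd h2 (by decide)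
        · intro h1; exact absurd h1 (by omega)
      · simp only [if_neg hz]; exact hih.1 z

-- ===== VERDICT (by name: the statement is the Claim_ definition above) =====
theorem arreglo_spec : Claim_equal_arreglo := by
  intro arr1 arr2 _
  unfold Spec_arreglo arreglo arreglo_alt
  set m := arr1 ++ arr2 with hm
  set d0 := m.foldl (fun d i => d.insert i (0:Int)) PySem.Dict.empty with hd0
  set d1 := m.foldl (fun d i => d.insert i (d.getD i 0 + 1)) d0 with hd1
  -- the dict after the two loops: keys = distinct elements of m, values = counts
  have h0 : ∀ v, d0.getD v 0 = 0 :=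
    getD_foldl_insert_zero m PySem.Dict.empty (fun v => rfl)
  have hmemk : ∀ x, x ∈ d1.keys ↔ x ∈ m := by
    intro x
    rw [hd1, mem_keys_foldl_insert, hd0,
      mem_keys_foldl_insert m (fun _ _ => (0:Int)) PySem.Dict.empty x]
    simp [PySem.Dict.keys]
    tauto
  have hndk : d1.keys.Nodup := by
    rw [hd1, hd0]
    exact PySem.Dict.nodup_keys_foldl_insert m _ _
      (PySem.Dict.nodup_keys_foldl_insert m (fun _ _ => (0:Int)) _ PySem.Dict.nodup_keys_empty)
  have hv1 : ∀ v, d1.getD v 0 = (m.count v : Int) := by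
    intro v
    rw [hd1, PySem.Dict.getD_foldl_insert_add_one, h0, zero_add]
  show PySem.List.sorted
      (List.foldl (fun acc i => if d1.getD i 0 == 1 then acc ++ [i] else acc) [] d1.keys)
      (fun x => x) false
    = uniqRuns (PySem.List.sorted m (fun x => x) false)
  -- the third loop builds the filtered key list
  have hcommd : d1.keys.foldl (fun acc i => if d1.getD i 0 == 1 then acc ++ [i] else acc) []
      = d1.keys.filter (fun i => m.count i == 1) := by
    have h := PySem.List.foldl_append_if (fun i => d1.getD i 0 == 1) (fun i => i) d1.keys []
    simp only [List.nil_append, List.map_id'] at h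
    rw [h]
    refine List.filter_congr (fun x _ => ?_)
    rw [hv1 x]
    exact Bool.eq_iff_iff.mpr (by simp [Nat.cast_eq_one])
  rw [hcommd]
  -- B's output is a strictly increasing rearrangement of A's filtered key list
  have hsp : (PySem.List.sorted m (fun x => x) false).Pairwise (· ≤ ·) :=
    PySem.List.sorted_pairwise m (fun x => x)
  obtain ⟨hmem, hlt⟩ := uniqRuns_spec _ hsp
  have hcnt : ∀ x, (PySem.List.sorted m (fun x => x) false).count x = m.count x := by
    intro x
    exact (PySem.List.sorted_perm m (fun x => x) false).count_eq x
  have hperm : (uniqRuns (PySem.List.sorted m (fun x => x) false)).Perm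
      (d1.keys.filter (fun i => m.count i == 1)) := by
    have hnd1 : (uniqRuns (PySem.List.sorted m (fun x => x) false)).Nodup :=
      hlt.imp (fun h => ne_of_lt h)
    rw [List.perm_ext_iff_of_nodup hnd1 (hndk.filter _)]
    intro x
    rw [hmem x, hcnt x]
    simp only [List.mem_filter, hmemk x, beq_iff_eq]
    constructor
    · intro h1
      exact ⟨List.count_pos_iff.mp (by omega), h1⟩
    · exact fun h1 => h1.2
  exact PySem.List.sorted_eq_of_perm_of_pairwise_lt _ _ (fun x => x) hperm hlt
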